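-- pv_equiv track=rewrite | github.com/zoeysolis/binomio-newton-python | binomio.py | simplificar_variables
-- ===== SOURCE A (Python) =====
-- def simplificar_variables(letras):
--     """Simplifica variables repetidas (ej: 'xxy' -> 'x^2y')"""
--     cuenta = {}
--     for letra in letras:
--         cuenta[letra] = cuenta.get(letra, 0) + 1
--
--     resultado = ""
--     for letra in sorted(cuenta):
--         cantidad = cuenta[letra]
--         if cantidad == 1:
--             resultado += letra
--         else:
--             resultado += f"{letra}^{cantidad}"
--     return resultado
-- ===== SOURCE B (Python) =====
-- def simplificar_variables(letras):
--     """Simplifica variables repetidas (ej: 'xxy' -> 'x^2y')"""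
--     s = sorted(letras)
--     out = []
--     i = 0
--     while i < len(s):
--         j = i
--         while j < len(s) and s[j] == s[i]:
--             j += 1
--         n = j - i
--         out.append(s[i] if n == 1 else f"{s[i]}^{n}")
--         i = j
--     return "".join(out)
-- ===== Notes on version B (the rewrite author's own statement) =====
-- stated objective: alternative
-- what changed: B sorts the characters first and run-length-scans contiguous runs of equal characters, instead of A's frequency-dict-then-sorted-keys decomposition; no dictionary is built.
import Mathlib
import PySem

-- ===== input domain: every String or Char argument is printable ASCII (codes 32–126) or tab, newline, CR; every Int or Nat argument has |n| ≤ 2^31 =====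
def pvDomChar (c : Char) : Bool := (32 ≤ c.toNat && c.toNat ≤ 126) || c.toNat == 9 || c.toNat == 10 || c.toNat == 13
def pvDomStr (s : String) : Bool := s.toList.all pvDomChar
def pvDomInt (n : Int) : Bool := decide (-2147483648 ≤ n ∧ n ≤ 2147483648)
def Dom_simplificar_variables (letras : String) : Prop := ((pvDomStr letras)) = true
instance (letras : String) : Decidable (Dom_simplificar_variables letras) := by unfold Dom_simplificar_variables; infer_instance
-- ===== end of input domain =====

-- B replaces A's frequency-dict-then-sorted-keys decomposition by sort-then-run-length scan (alternative decomposition, no dict).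

-- ===== PORT A =====
def simplificar_variables (letras : String) : String :=
  let cuenta := letras.toList.foldl
    (fun d letra => d.insert letra (d.getD letra 0 + 1)) PySem.Dict.empty
  String.ofList ((PySem.List.sorted cuenta.keys (fun x => x)).foldl
    (fun resultado letra =>
      let cantidad := cuenta.getD letra 0
      if cantidad == 1 then resultado ++ [letra]
      else resultado ++ (letra :: '^' :: PySem.Int.toChars cantidad)) [])

-- ===== PORT B =====
def pvPiece (c : Char) (n : Int) : List Char :=
  if n == 1 then [c] else c :: '^' :: PySem.Int.toChars n

def pvRuns : List Char → List (List Char)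
  | [] => []
  | c :: rest =>
      pvPiece c (((rest.takeWhile (fun x => x == c)).length + 1 : Nat) : Int)
        :: pvRuns (rest.dropWhile (fun x => x == c))
termination_by l => l.length
decreasing_by
  exact Nat.lt_succ_of_le (List.length_dropWhile_le _ _)

def simplificar_variables_alt (letras : String) : String :=
  String.ofList (PySem.Chars.join [] (pvRuns (PySem.List.sorted letras.toList (fun x => x))))

-- ===== PRECONDITION & SPEC =====
def Spec_simplificar_variables (letras : String) (out : String) : Prop := out = simplificar_variables_alt letras
instance (letras : String) (out : String) : Decidable (Spec_simplificar_variables letras out) := by unfold Spec_simplificar_variables; infer_instance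

-- ===== CLAIM (what is proved, stated in full; the proofs are below) =====
def Claim_equal_simplificar_variables : Prop := ∀ (letras : String), Dom_simplificar_variables letras → Spec_simplificar_variables letras (simplificar_variables letras)

-- ===== LEMMAS AND PROOFS =====

-- "".join is concatenation
theorem pv_join_nil_flatten (ps : List (List Char)) :
    PySem.Chars.join [] ps = ps.flatten := by
  induction ps with
  | nil => simp [PySem.Chars.join_nil]
  | cons a t ih =>
    cases t with
    | nil => simp [PySem.Chars.join_singleton]
    | cons b t' =>
      rw [PySem.Chars.join_cons_cons]
      simp only [List.flatten_cons] at ih ⊢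
      rw [ih]; simp

-- head of dropWhile fails the predicate
theorem pv_dropWhile_head_false {p : Char → Bool} {l : List Char} {t0 : Char} {t' : List Char}
    (h : l.dropWhile p = t0 :: t') : p t0 = false := by
  have hw : l.dropWhile p ≠ [] := by rw [h]; simp
  have := List.head_dropWhile_not p hw
  simp only [h, List.head_cons] at this
  exact this

-- run-length decomposition of a ≤-sorted list equals map over its sorted distinct elements
theorem pv_runs_sorted (s : List Char) (h : s.Pairwise (· ≤ ·)) :
    pvRuns s =
      (PySem.List.sorted (PySem.Set.ofList s) (fun x => x)).map
        (fun c => pvPiece c ((s.count c : Nat) : Int)) := by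
  induction s using pvRuns.induct with
  | case1 => simp [pvRuns, PySem.Set.ofList_nil, PySem.List.sorted_eq_nil_iff]
  | case2 c rest ih =>
    have hle : ∀ x ∈ rest, c ≤ x := (List.pairwise_cons.mp h).1
    have hrest : rest.Pairwise (· ≤ ·) := (List.pairwise_cons.mp h).2
    set run := rest.takeWhile (fun x => x == c) with hrun
    set t := rest.dropWhile (fun x => x == c) with ht
    have hsplit : run ++ t = rest := List.takeWhile_append_dropWhile
    have hmem_t : ∀ x ∈ t, x ∈ rest := fun x hx =>
      (List.dropWhile_sublist _).mem hx
    have hrun_all : ∀ x ∈ run, x = c := by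
      intro x hx
      have := List.mem_takeWhile_imp hx
      simpa using this
    have ht_pair : t.Pairwise (· ≤ ·) := hrest.sublist (List.dropWhile_sublist _)
    -- c is not in t
    have hc_not_t : c ∉ t := by
      intro hc
      cases htc : t with
      | nil => rw [htc] at hc; simp at hc
      | cons t0 t' =>
        have hne : (t0 == c) = false :=
          pv_dropWhile_head_false (p := fun x => x == c) (l := rest) (by rw [← ht]; exact htc)
        have ht0c : t0 ≠ c := by simpa using hne
        rw [htc] at hc
        rcases List.mem_cons.mp hc with h1 | h2
        · exact ht0c h1.symm
        · have h3 : t0 ≤ c := by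
            rw [htc] at ht_pair
            exact (List.pairwise_cons.mp ht_pair).1 c h2
          have h4 : c ≤ t0 := hle t0 (hmem_t t0 (by rw [htc]; simp))
          exact ht0c (le_antisymm h3 h4)
    have hx_ne_c : ∀ x ∈ t, x ≠ c := fun x hx hxc => hc_not_t (hxc ▸ hx)
    -- counts
    have hcount_c : (c :: rest).count c = run.length + 1 := by
      rw [List.count_cons_self, ← hsplit, List.count_append]
      have h1 : run.count c = run.length :=
        List.count_eq_length.mpr (fun b hb => (hrun_all b hb).symm)
      have h2 : t.count c = 0 := List.count_eq_zero.mpr hc_not_t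
      omega
    have hcount_ne : ∀ x, x ≠ c → (c :: rest).count x = t.count x := by
      intro x hx
      have h1 : run.count x = 0 := List.count_eq_zero.mpr
        (fun hmem => hx (hrun_all x hmem))
      rw [← hsplit]
      simp [List.count_append, h1, hx.symm]
    -- sorted set decomposition
    have hset : PySem.List.sorted (PySem.Set.ofList (c :: rest)) (fun x => x) =
        c :: PySem.List.sorted (PySem.Set.ofList t) (fun x => x) := by
      apply PySem.List.sorted_eq_of_perm_of_pairwise_lt
      · apply List.perm_of_nodup_nodup_toFinset_eq
        · refine List.nodup_cons.mpr ⟨?_, ?_⟩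
          · intro hc
            exact hc_not_t ((PySem.Set.mem_ofList t c).mp
              ((PySem.List.mem_sorted _ _ _ _).mp hc))
          · exact ((PySem.List.sorted_perm _ _ _).nodup_iff).mpr
              (PySem.Set.nodup_ofList t)
        · exact PySem.Set.nodup_ofList _
        · ext x
          simp only [List.mem_toFinset, List.mem_cons, PySem.Set.mem_ofList,
            PySem.List.mem_sorted]
          constructor
          · rintro (rfl | hx)
            · exact Or.inl rfl
            · exact Or.inr (hmem_t x hx)
          · rintro (rfl | hx)
            · exact Or.inl rfl
            · rcases List.mem_append.mp (hsplit ▸ hx : x ∈ run ++ t) with h1 | h2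
              · exact Or.inl (hrun_all x h1)
              · exact Or.inr h2
      · refine List.pairwise_cons.mpr ⟨?_, PySem.List.sorted_ofList_pairwise_lt t⟩
        intro x hx
        have hxt : x ∈ t := (PySem.Set.mem_ofList t x).mp
          ((PySem.List.mem_sorted _ _ _ _).mp hx)
        exact lt_of_le_of_ne (hle x (hmem_t x hxt)) (Ne.symm (hx_ne_c x hxt))
    rw [pvRuns, hset, List.map_cons]
    congr 1
    · rw [← hrun, hcount_c]
    · rw [ih ht_pair]
      apply List.map_congr_left
      intro x hx
      have hxt : x ∈ t := (PySem.Set.mem_ofList t x).mp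
        ((PySem.List.mem_sorted _ _ _ _).mp hx)
      rw [hcount_ne x (hx_ne_c x hxt)]

theorem pv_main (l : List Char) :
    (let cuenta := l.foldl (fun d letra => d.insert letra (d.getD letra 0 + 1)) PySem.Dict.empty
     (PySem.List.sorted cuenta.keys (fun x => x)).foldl
      (fun resultado letra =>
        let cantidad := cuenta.getD letra 0
        if cantidad == 1 then resultado ++ [letra]
        else resultado ++ (letra :: '^' :: PySem.Int.toChars cantidad)) []) =
    PySem.Chars.join [] (pvRuns (PySem.List.sorted l (fun x => x))) := by
  simp only [PySem.Dict.foldl_insert_getD_add_one_eq_counter, PySem.Dict.keys_counter,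
    PySem.Dict.getD_counter]
  have hfun : (fun (resultado : List Char) (letra : Char) =>
      if ((l.count letra : Int) == 1) then resultado ++ [letra]
      else resultado ++ (letra :: '^' :: PySem.Int.toChars (l.count letra))) =
      (fun resultado letra => resultado ++ pvPiece letra ((l.count letra : Nat) : Int)) := by
    funext resultado letra
    unfold pvPiece
    split <;> rfl
  rw [hfun, PySem.List.foldl_append_eq_flatMap, List.nil_append]
  rw [pv_join_nil_flatten, pv_runs_sorted _ (by simpa using PySem.List.sorted_pairwise l (fun x => x))]
  rw [List.flatMap_def]
  congr 1
  have hperm : PySem.Set.ofList (PySem.List.sorted l (fun x => x)) |>.Perm (PySem.Set.ofList l) := by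
    apply List.perm_of_nodup_nodup_toFinset_eq (PySem.Set.nodup_ofList _) (PySem.Set.nodup_ofList _)
    ext x
    simp [PySem.Set.mem_ofList, PySem.List.mem_sorted]
  rw [PySem.List.sorted_eq_sorted_of_perm _ _ _ (fun a b h => h) hperm]
  apply List.map_congr_left
  intro x _
  rw [List.Perm.count_eq (PySem.List.sorted_perm l (fun x => x) false)]

-- ===== VERDICT (by name: the statement is the Claim_ definition above) =====
theorem simplificar_variables_spec : Claim_equal_simplificar_variables := by
  intro letras _
  unfold Spec_simplificar_variables simplificar_variables simplificar_variables_alt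
  exact congrArg String.ofList (pv_main letras.toList)
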